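-- pv_equiv track=rewrite | github.com/SHN2004/hand-gesture-recognition-mediapipe | manage_two_hand_sequence_signs.py | _word_to_class_key
-- ===== SOURCE A (Python) =====
-- def _normalize_word(word: str) -> str:
--     return " ".join(word.strip().upper().split())
--
-- def _word_to_class_key(word: str) -> str:
--     normalized = _normalize_word(word)
--     raw = normalized.replace(" ", "_").replace("-", "_")
--     allowed = "ABCDEFGHIJKLMNOPQRSTUVWXYZ0123456789_"
--     key = "".join(ch if ch in allowed else "_" for ch in raw)
--     while "__" in key:
--         key = key.replace("__", "_")
--     key = key.strip("_")
--     if not key: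
--         raise ValueError(f"Cannot build class key from word: {word!r}")
--     if not key.startswith("CUSTOM_"):
--         key = f"CUSTOM_{key}"
--     return key
-- ===== SOURCE B (Python) =====
-- import re
--
-- def _word_to_class_key(word: str) -> str:
--     # One pass: extract the maximal A-Z0-9 runs of the uppercased word and join
--     # them with single underscores (replaces A's normalize/replace/filter/collapse/strip pipeline).
--     key = "_".join(re.findall(r"[A-Z0-9]+", word.upper()))
--     if not key:
--         raise ValueError(f"Cannot build class key from word: {word!r}")
--     if not key.startswith("CUSTOM_"):
--         key = f"CUSTOM_{key}"
--     return key
-- ===== Notes on version B (the rewrite author's own statement) =====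
-- stated objective: simpler
-- what changed: The whole normalize/replace/filter/while-collapse/strip pipeline is replaced by extracting the maximal [A-Z0-9]+ runs of the uppercased word with one re.findall and joining them with single underscores; only the emptiness check and the CUSTOM_ prefix remain.
import Mathlib
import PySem

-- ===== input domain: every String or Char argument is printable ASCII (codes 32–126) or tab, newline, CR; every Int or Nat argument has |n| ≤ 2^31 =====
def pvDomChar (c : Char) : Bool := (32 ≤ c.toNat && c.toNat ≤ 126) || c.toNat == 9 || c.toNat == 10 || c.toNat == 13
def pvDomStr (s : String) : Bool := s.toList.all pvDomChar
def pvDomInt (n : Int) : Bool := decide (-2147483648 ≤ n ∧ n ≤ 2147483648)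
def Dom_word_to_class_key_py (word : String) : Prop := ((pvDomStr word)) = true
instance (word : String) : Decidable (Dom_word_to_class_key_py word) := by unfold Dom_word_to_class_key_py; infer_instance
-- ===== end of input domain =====

-- B replaces A's normalize/replace/filter/while-collapse/strip pipeline by extracting the maximal
-- [A-Z0-9]+ runs of the uppercased word and joining them with single underscores (objective: simpler).

-- ===== PORT A =====
def normalize_word_py (word : String) : String :=
  PySem.Str.join " " (PySem.Str.split₀ (PySem.Str.upper (PySem.Str.strip word)))

def pvAllowed : List Char := "ABCDEFGHIJKLMNOPQRSTUVWXYZ0123456789_".toList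

-- reference form of one pass of key.replace("__", "_"); used to justify termination of the while loop
def pvRep : List Char → List Char
  | [] => []
  | [c] => [c]
  | a :: b :: t => if a = '_' ∧ b = '_' then '_' :: pvRep t else a :: pvRep (b :: t)

theorem pvRep_go (fuel : Nat) : ∀ l acc : List Char, l.length ≤ fuel →
    PySem.Chars.replace.go ['_', '_'] ['_'] fuel l acc = acc.reverse ++ pvRep l := by
  induction fuel with
  | zero =>
    intro l acc h
    have hl : l = [] := List.eq_nil_of_length_eq_zero (Nat.le_zero.1 h)
    subst hl
    simp [PySem.Chars.replace.go, pvRep]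
  | succ n ih =>
    intro l acc h
    match l with
    | [] => simp [PySem.Chars.replace.go, pvRep]
    | a :: t =>
      rw [PySem.Chars.replace.go]
      by_cases hp : List.isPrefixOf ['_', '_'] (a :: t)
      · rw [if_pos hp]
        match t, hp with
        | [], hp => simp [List.isPrefixOf] at hp
        | b :: t', hp =>
          have ha : a = '_' := by
            simp [List.isPrefixOf] at hp; exact hp.1.symm
          have hb : b = '_' := by
            simp [List.isPrefixOf] at hp; exact hp.2.symm
          subst ha; subst hb
          rw [show List.drop (['_', '_'] : List Char).length ('_' :: '_' :: t') = t' from rfl,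
              show ((['_'] : List Char).reverse ++ acc) = '_' :: acc from rfl]
          rw [ih t' ('_' :: acc) (by simp at h ⊢; omega)]
          simp [pvRep]
      · rw [if_neg hp]
        rw [ih t (a :: acc) (by simp at h ⊢; omega)]
        have hrep : pvRep (a :: t) = a :: pvRep t := by
          match t with
          | [] => simp [pvRep]
          | b :: t' =>
            have : ¬(a = '_' ∧ b = '_') := by
              intro ⟨h1, h2⟩; subst h1; subst h2; simp [List.isPrefixOf] at hp
            simp [pvRep, this]
        rw [hrep]; simp

theorem replace_uu (xs : List Char) :
    PySem.Chars.replace xs ['_', '_'] ['_'] = pvRep xs := by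
  rw [PySem.Chars.replace]
  simp [pvRep_go xs.length xs [] (le_refl _)]

theorem pvRep_length_le (xs : List Char) : (pvRep xs).length ≤ xs.length := by
  induction xs using pvRep.induct with
  | case1 => simp [pvRep]
  | case2 c => simp [pvRep]
  | case3 a b t hc ih => simp only [pvRep, if_pos hc, List.length_cons]; omega
  | case4 a b t h ih => simp only [pvRep, if_neg h, List.length_cons] at ih ⊢; omega

theorem pvRep_length_lt (xs : List Char) (h : ['_', '_'] <:+: xs) :
    (pvRep xs).length < xs.length := by
  induction xs using pvRep.induct with
  | case1 => simp at h
  | case2 c =>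
    exfalso
    have := h.length_le; simp at this
  | case3 a b t hc ih =>
    simp only [pvRep, if_pos hc, List.length_cons]
    have := pvRep_length_le t; omega
  | case4 a b t hne ih =>
    have h' : ['_', '_'] <:+: (b :: t) := by
      rcases (List.infix_cons_iff).1 h with hpre | hinf
      · exfalso
        rcases hpre with ⟨r, hr⟩
        simp at hr
        exact hne ⟨hr.1.symm, hr.2.1.symm⟩
      · exact hinf
    simp only [pvRep, if_neg hne]
    simpa using Nat.succ_lt_succ (ih h')

-- the 'while "__" in key: key = key.replace("__", "_")' loop
def pvCollapse (key : List Char) : List Char :=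
  if h : PySem.Chars.isIn "__".toList key = true then
    pvCollapse (PySem.Chars.replace key "__".toList "_".toList)
  else key
termination_by key.length
decreasing_by
  have hx : ("__".toList : List Char) = ['_', '_'] := rfl
  have hy : ("_".toList : List Char) = ['_'] := rfl
  rw [hx] at h
  rw [hx, hy, replace_uu]
  exact pvRep_length_lt key ((PySem.Chars.isIn_iff_infix _ _).1 h)

def word_to_class_key_py (word : String) : String :=
  let normalized := normalize_word_py word
  let raw := PySem.Str.replace (PySem.Str.replace normalized " " "_") "-" "_"
  let key0 := raw.toList.map (fun ch => if pvAllowed.contains ch then ch else '_')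
  let key := PySem.Chars.stripChars (pvCollapse key0) ['_']
  if key = [] then ""  -- Python raises ValueError here; excluded by Pre_
  else if PySem.Chars.startswith key "CUSTOM_".toList then String.ofList key
  else String.ofList ("CUSTOM_".toList ++ key)

-- ===== PORT B =====
def pvGood (c : Char) : Bool := "ABCDEFGHIJKLMNOPQRSTUVWXYZ0123456789".toList.contains c

-- re.findall(r"[A-Z0-9]+", s) ported by hand: the maximal runs of class characters, in order (exact for this pattern)
def pvTokens (p : Char → Bool) : List Char → List (List Char)
  | [] => []
  | c :: t =>
    if p c then (c :: t.takeWhile p) :: pvTokens p (t.dropWhile p)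
    else pvTokens p t
termination_by cs => cs.length
decreasing_by
  · exact Nat.lt_succ_of_le (List.length_dropWhile_le p t)
  · simp

def word_to_class_key_py_alt (word : String) : String :=
  let key := PySem.Chars.join ['_'] (pvTokens pvGood (PySem.Chars.upper word.toList))
  if key = [] then ""  -- Python raises ValueError here; excluded by Pre_
  else if PySem.Chars.startswith key "CUSTOM_".toList then String.ofList key
  else String.ofList ("CUSTOM_".toList ++ key)

-- ===== PRECONDITION & SPEC =====
-- Pre_ excludes exactly the words with no ASCII alphanumeric character, on which A raises ValueError.
def Pre_word_to_class_key_py (word : String) : Prop :=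
  word.toList.any (fun c => pvGood (PySem.Chars.upperChar c)) = true
instance (word : String) : Decidable (Pre_word_to_class_key_py word) := by
  unfold Pre_word_to_class_key_py; infer_instance

def pvWitness_word_to_class_key_py : String := "hello world"

def Spec_word_to_class_key_py (word : String) (out : String) : Prop := out = word_to_class_key_py_alt word
instance (word : String) (out : String) : Decidable (Spec_word_to_class_key_py word out) := by
  unfold Spec_word_to_class_key_py; infer_instance

-- ===== CLAIM (what is proved, stated in full; the proofs are below) =====
def Claim_equal_word_to_class_key_py : Prop := ∀ (word : String), Dom_word_to_class_key_py word → Pre_word_to_class_key_py word → Spec_word_to_class_key_py word (word_to_class_key_py word)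

-- ===== LEMMAS AND PROOFS =====

-- not-underscore predicate (character survives the allowed-filter as itself)
def pvNe (c : Char) : Bool := c != '_'

-- single-character replace is a map ----------------------------------------------------

theorem rep1_go (a b : Char) (fuel : Nat) : ∀ l acc : List Char, l.length ≤ fuel →
    PySem.Chars.replace.go [a] [b] fuel l acc =
      acc.reverse ++ l.map (fun c => if c = a then b else c) := by
  induction fuel with
  | zero =>
    intro l acc h
    have hl : l = [] := List.eq_nil_of_length_eq_zero (Nat.le_zero.1 h)
    subst hl
    simp [PySem.Chars.replace.go]
  | succ n ih =>
    intro l acc h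
    match l with
    | [] => simp [PySem.Chars.replace.go]
    | c :: t =>
      rw [PySem.Chars.replace.go]
      by_cases hp : List.isPrefixOf [a] (c :: t)
      · have hac : a = c := by simpa [List.isPrefixOf] using hp
        rw [if_pos hp, show List.drop ([a] : List Char).length (c :: t) = t from rfl,
            show (([b] : List Char).reverse ++ acc) = b :: acc from rfl]
        rw [ih t (b :: acc) (by simp at h ⊢; omega)]
        subst hac
        simp
      · have hac : ¬ c = a := by
          simp [List.isPrefixOf] at hp; exact fun e => hp e.symm
        rw [if_neg hp, ih t (c :: acc) (by simp at h ⊢; omega)]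
        simp [hac]

theorem replace_single (a b : Char) (s : List Char) :
    PySem.Chars.replace s [a] [b] = s.map (fun c => if c = a then b else c) := by
  rw [PySem.Chars.replace]
  simp [rep1_go a b s.length s [] (le_refl _)]

-- character facts ----------------------------------------------------------------------

theorem good_mem {c : Char} (h : pvGood c = true) :
    c ∈ "ABCDEFGHIJKLMNOPQRSTUVWXYZ0123456789".toList := by
  unfold pvGood at h
  simpa [List.contains_eq_mem] using h

theorem good_not_us {c : Char} (h : pvGood c = true) : pvNe c = true := by
  have hall : ("ABCDEFGHIJKLMNOPQRSTUVWXYZ0123456789".toList).all (fun c => c != '_') = true := by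
    decide
  have := List.all_eq_true.1 hall c (good_mem h)
  simpa [pvNe] using this

theorem good_not_space {c : Char} (h : pvGood c = true) : PySem.Chars.isspace c = false := by
  have hall : ("ABCDEFGHIJKLMNOPQRSTUVWXYZ0123456789".toList).all
      (fun c => !PySem.Chars.isspace c) = true := by decide
  have := List.all_eq_true.1 hall c (good_mem h)
  simpa using this

theorem space_upper_not_good {c : Char} (h : PySem.Chars.isspace c = true) :
    pvGood (PySem.Chars.upperChar c) = false := by
  have hlow : PySem.Chars.islower c = false := by
    cases hl : PySem.Chars.islower c
    · rfl
    · exfalso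
      unfold PySem.Chars.islower at hl
      unfold PySem.Chars.isspace at h
      simp only [Bool.and_eq_true, decide_eq_true_eq, Char.le_def,
        UInt32.le_iff_toNat_le] at hl
      simp only [Bool.or_eq_true, Bool.and_eq_true, decide_eq_true_eq] at h
      have e1 : ('a').val.toNat = 97 := rfl
      have e2 : ('z').val.toNat = 122 := rfl
      have e3 : c.toNat = c.val.toNat := rfl
      rw [e1, e2, ← e3] at hl
      omega
  unfold PySem.Chars.upperChar
  rw [hlow]
  simp only [Bool.false_eq_true, if_false]
  cases hg : pvGood c
  · rfl
  · rw [good_not_space hg] at h; exact absurd h (by simp)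

theorem allowed_split : pvAllowed = "ABCDEFGHIJKLMNOPQRSTUVWXYZ0123456789".toList ++ ['_'] := by
  decide

theorem mem_allowed_iff {c : Char} : c ∈ pvAllowed ↔ (pvGood c = true ∨ c = '_') := by
  rw [allowed_split, List.mem_append]
  unfold pvGood
  simp [List.contains_eq_mem]

theorem filter_comp (c : Char) :
    (if pvAllowed.contains (if (if c = ' ' then '_' else c) = '-' then '_' else if c = ' ' then '_' else c)
      then (if (if c = ' ' then '_' else c) = '-' then '_' else if c = ' ' then '_' else c) else '_')
    = (if pvGood c then c else '_') := by
  by_cases h1 : c = ' '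
  · subst h1; decide
  · by_cases h2 : c = '-'
    · subst h2; decide
    · rw [if_neg h1, if_neg h2]
      by_cases hg : pvGood c
      · rw [if_pos hg]
        have : pvAllowed.contains c = true := by
          simp [List.contains_eq_mem]; exact mem_allowed_iff.2 (Or.inl hg)
        rw [this]; simp
      · rw [if_neg hg]
        by_cases hu : c = '_'
        · subst hu; decide
        · have : pvAllowed.contains c = false := by
            simp [List.contains_eq_mem]
            intro hmem
            rcases mem_allowed_iff.1 hmem with hx | hx
            · exact hg (by simp [hx])
            · exact hu hx
          rw [this]; simp

-- pvTokens toolbox ---------------------------------------------------------------------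

theorem tokens_nil_of_allneg {p : Char → Bool} : ∀ {B : List Char}, (∀ c ∈ B, p c = false) →
    pvTokens p B = [] := by
  intro B
  induction B with
  | nil => intro _; simp [pvTokens]
  | cons c t ih =>
    intro hB
    rw [pvTokens, if_neg (by simp [hB c (List.mem_cons_self ..)])]
    exact ih (fun x hx => hB x (List.mem_cons_of_mem _ hx))

theorem dropWhile_eq_self_of_head {p : Char → Bool} {B : List Char}
    (hB : List.takeWhile p B = []) : List.dropWhile p B = B := by
  cases B with
  | nil => rfl
  | cons c t =>
    rw [List.takeWhile_cons] at hB
    by_cases hc : p c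
    · rw [if_pos hc] at hB; cases hB
    · rw [List.dropWhile_cons_of_neg hc]

theorem tokens_append {p : Char → Bool} {B : List Char} (hB : List.takeWhile p B = []) :
    ∀ (n : Nat) (A : List Char), A.length ≤ n →
    pvTokens p (A ++ B) = pvTokens p A ++ pvTokens p B := by
  intro n
  induction n with
  | zero =>
    intro A hA
    have : A = [] := List.eq_nil_of_length_eq_zero (Nat.le_zero.1 hA)
    subst this
    simp [pvTokens]
  | succ n ih =>
    intro A hA
    match A with
    | [] => simp [pvTokens]
    | c :: t =>
      by_cases hc : p c
      · have htake : List.takeWhile p (t ++ B) = List.takeWhile p t := by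
          rw [List.takeWhile_append]
          split_ifs with hlen
          · rw [(List.takeWhile_prefix p).eq_of_length hlen, hB, List.append_nil]
          · rfl
        have hdrop : List.dropWhile p (t ++ B) = List.dropWhile p t ++ B := by
          rw [List.dropWhile_append]
          split_ifs with hemp
          · rw [List.isEmpty_iff] at hemp
            rw [hemp, List.nil_append, dropWhile_eq_self_of_head hB]
          · rfl
        rw [List.cons_append, pvTokens, if_pos hc, htake, hdrop,
          ih (List.dropWhile p t) (Nat.le_trans (List.length_dropWhile_le p t)
            (Nat.le_of_succ_le_succ hA))]
        rw [pvTokens, if_pos hc, List.cons_append]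
      · rw [List.cons_append, pvTokens, if_neg hc, pvTokens, if_neg hc]
        exact ih t (Nat.le_of_succ_le_succ hA)

theorem tokens_allneg_prefix {p : Char → Bool} : ∀ {A : List Char} {B : List Char},
    (∀ c ∈ A, p c = false) → pvTokens p (A ++ B) = pvTokens p B := by
  intro A
  induction A with
  | nil => intro B _; simp
  | cons c t ih =>
    intro B hA
    rw [List.cons_append, pvTokens, if_neg (by simp [hA c (List.mem_cons_self ..)])]
    exact ih (fun x hx => hA x (List.mem_cons_of_mem _ hx))

theorem takeWhile_nil_of_allneg {p : Char → Bool} {B : List Char}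
    (hB : ∀ c ∈ B, p c = false) : List.takeWhile p B = [] := by
  cases B with
  | nil => rfl
  | cons c t => rw [List.takeWhile_cons_of_neg (by simp [hB c (List.mem_cons_self ..)])]

theorem tokens_allneg_suffix {p : Char → Bool} {A B : List Char}
    (hB : ∀ c ∈ B, p c = false) : pvTokens p (A ++ B) = pvTokens p A := by
  rw [tokens_append (takeWhile_nil_of_allneg hB) A.length A (le_refl _),
    tokens_nil_of_allneg hB, List.append_nil]

theorem tokens_map {p1 p2 : Char → Bool} {f : Char → Char}
    (h1 : ∀ x, p2 (f x) = p1 x) (h2 : ∀ x, p1 x = true → f x = x) :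
    ∀ (n : Nat) (ys : List Char), ys.length ≤ n →
    pvTokens p2 (ys.map f) = pvTokens p1 ys := by
  have hfe : (p2 ∘ f) = p1 := funext h1
  intro n
  induction n with
  | zero =>
    intro ys hy
    have : ys = [] := List.eq_nil_of_length_eq_zero (Nat.le_zero.1 hy)
    subst this; simp [pvTokens]
  | succ n ih =>
    intro ys hy
    match ys with
    | [] => simp [pvTokens]
    | c :: t =>
      by_cases hc : p1 c
      · rw [List.map_cons, pvTokens, if_pos (by rw [h1]; exact hc),
          List.takeWhile_map, List.dropWhile_map, hfe, h2 c hc]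
        have hmapid : List.map f (List.takeWhile p1 t) = List.takeWhile p1 t := by
          rw [List.map_congr_left (fun x hx => h2 x (List.mem_takeWhile_imp hx))]; simp
        rw [hmapid, ih (List.dropWhile p1 t) (Nat.le_trans (List.length_dropWhile_le p1 t)
          (Nat.le_of_succ_le_succ hy))]
        rw [pvTokens, if_pos hc]
      · rw [List.map_cons, pvTokens, if_neg (by rw [h1]; exact hc), pvTokens, if_neg hc]
        exact ih t (Nat.le_of_succ_le_succ hy)

theorem tokens_join {p : Char → Bool} {s : Char} (hs : p s = false) :
    ∀ parts : List (List Char),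
    pvTokens p (PySem.Chars.join [s] parts) = parts.flatMap (pvTokens p) := by
  intro parts
  induction parts with
  | nil => simp [PySem.Chars.join_nil, pvTokens]
  | cons a r ihr =>
    cases r with
    | nil => simp [PySem.Chars.join_singleton]
    | cons b r' =>
      rw [PySem.Chars.join_cons_cons, List.append_assoc]
      have hB : List.takeWhile p ((s :: PySem.Chars.join [s] (b :: r') : List Char)) = [] := by
        rw [List.takeWhile_cons_of_neg (by simp [hs])]
      rw [show ([s] ++ PySem.Chars.join [s] (b :: r') : List Char)
            = s :: PySem.Chars.join [s] (b :: r') from rfl]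
      rw [tokens_append hB a.length a (le_refl _)]
      rw [pvTokens, if_neg (by simp [hs]), ihr]; simp

theorem split₀_go_spec : ∀ (l cur : List Char) (acc : List (List Char)),
    PySem.Chars.split₀.go l cur acc =
      acc.reverse ++ (if cur = [] then pvTokens (fun c => !PySem.Chars.isspace c) l
        else (cur.reverse ++ l.takeWhile (fun c => !PySem.Chars.isspace c)) ::
          pvTokens (fun c => !PySem.Chars.isspace c) (l.dropWhile (fun c => !PySem.Chars.isspace c))) := by
  intro l
  induction l with
  | nil =>
    intro cur acc
    rw [PySem.Chars.split₀.go]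
    by_cases hcur : cur = []
    · subst hcur; simp [pvTokens]
    · rw [if_neg (by simpa [List.isEmpty_iff] using hcur), if_neg hcur]
      simp [pvTokens]
  | cons c rest ih =>
    intro cur acc
    rw [PySem.Chars.split₀.go]
    by_cases hsp : PySem.Chars.isspace c
    · rw [if_pos hsp]
      by_cases hcur : cur = []
      · subst hcur
        rw [if_pos (by simp), ih]
        simp [pvTokens, hsp]
      · rw [if_neg (by simpa [List.isEmpty_iff] using hcur), ih, if_neg hcur]
        simp [pvTokens, hsp, List.takeWhile_cons, List.dropWhile_cons]
    · rw [if_neg hsp, ih]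
      rw [if_neg (by simp)]
      by_cases hcur : cur = []
      · subst hcur
        simp [pvTokens, hsp, List.takeWhile_cons, List.dropWhile_cons]
      · rw [if_neg hcur]
        simp [pvTokens, hsp, List.takeWhile_cons, List.dropWhile_cons]

theorem split₀_eq_tokens (s : List Char) :
    PySem.Chars.split₀ s = pvTokens (fun c => !PySem.Chars.isspace c) s := by
  rw [PySem.Chars.split₀, split₀_go_spec]
  simp

theorem dropWhile_head_neg {p : Char → Bool} : ∀ {d : Char} {t dt : List Char},
    List.dropWhile p t = d :: dt → p d = false := by
  intro d t
  induction t with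
  | nil => intro dt h; cases h
  | cons c r ih =>
    intro dt h
    rw [List.dropWhile_cons] at h
    by_cases hc : p c
    · rw [if_pos hc] at h; exact ih h
    · rw [if_neg hc] at h
      injection h with h1 _
      rw [h1] at hc; simpa using hc

theorem tokens_refine {p q : Char → Bool} (himp : ∀ c, p c = true → q c = true) :
    ∀ (n : Nat) (l : List Char), l.length ≤ n →
    pvTokens p l = (pvTokens q l).flatMap (pvTokens p) := by
  intro n
  induction n with
  | zero =>
    intro l hl
    have : l = [] := List.eq_nil_of_length_eq_zero (Nat.le_zero.1 hl)
    subst this; simp [pvTokens]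
  | succ n ih =>
    intro l hl
    match l with
    | [] => simp [pvTokens]
    | c :: t =>
      have hcontra : ∀ x, q x = false → p x = false := by
        intro x hx
        cases hp : p x
        · rfl
        · rw [himp x hp] at hx; cases hx
      have hhead : List.takeWhile p (List.dropWhile q t) = [] := by
        cases hd : List.dropWhile q t with
        | nil => rfl
        | cons d dt =>
          exact List.takeWhile_cons_of_neg
            (by simp [hcontra d (dropWhile_head_neg hd)])
      have hdqself : List.dropWhile p (List.dropWhile q t) = List.dropWhile q t :=
        dropWhile_eq_self_of_head hhead
      have hih : pvTokens p (List.dropWhile q t)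
          = (pvTokens q (List.dropWhile q t)).flatMap (pvTokens p) :=
        ih (List.dropWhile q t)
          (Nat.le_trans (List.length_dropWhile_le q t) (Nat.le_of_succ_le_succ hl))
      have hsplit : t = List.takeWhile q t ++ List.dropWhile q t :=
        (List.takeWhile_append_dropWhile).symm
      by_cases hq : q c
      · by_cases hp : p c
        · have h1 : List.takeWhile p (List.takeWhile q t) = List.takeWhile p t := by
            rw [List.takeWhile_takeWhile]
            congr 1
            funext a
            by_cases hpa : p a
            · simp [hpa, himp a hpa]
            · simp [hpa]
          have h2 : List.dropWhile p t
              = List.dropWhile p (List.takeWhile q t) ++ List.dropWhile q t := by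
            conv_lhs => rw [hsplit]
            rw [List.dropWhile_append]
            split_ifs with hemp
            · rw [List.isEmpty_iff] at hemp
              rw [hemp, List.nil_append, hdqself]
            · rfl
          simp only [pvTokens, if_pos hp, if_pos hq, List.flatMap_cons]
          rw [← h1, h2,
            tokens_append hhead (List.dropWhile p (List.takeWhile q t)).length _ (le_refl _),
            ← hih, List.cons_append]
        · simp only [pvTokens, if_neg hp, if_pos hq, List.flatMap_cons, if_neg hp]
          conv_lhs => rw [hsplit]
          rw [tokens_append hhead (List.takeWhile q t).length _ (le_refl _), ← hih]
      · have hpc : p c = false := hcontra c (by simpa using hq)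
        rw [pvTokens, if_neg (by simp [hpc]), pvTokens, if_neg hq]
        exact ih t (Nat.le_of_succ_le_succ hl)

theorem tokens_upper_strip (wl : List Char) :
    pvTokens pvGood (PySem.Chars.upper (PySem.Chars.strip wl)) =
    pvTokens pvGood (PySem.Chars.upper wl) := by
  have hw : wl = List.takeWhile PySem.Chars.isspace wl ++ List.dropWhile PySem.Chars.isspace wl :=
    (List.takeWhile_append_dropWhile).symm
  have hx : List.dropWhile PySem.Chars.isspace wl =
      (List.dropWhile PySem.Chars.isspace ((List.dropWhile PySem.Chars.isspace wl).reverse)).reverse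
      ++ (List.takeWhile PySem.Chars.isspace ((List.dropWhile PySem.Chars.isspace wl).reverse)).reverse := by
    conv_lhs => rw [← List.reverse_reverse (List.dropWhile PySem.Chars.isspace wl),
      ← List.takeWhile_append_dropWhile (p := PySem.Chars.isspace)
        (l := (List.dropWhile PySem.Chars.isspace wl).reverse)]
    rw [List.reverse_append]
  have hstrip : PySem.Chars.strip wl =
      (List.dropWhile PySem.Chars.isspace ((List.dropWhile PySem.Chars.isspace wl).reverse)).reverse := rfl
  conv_rhs => rw [PySem.Chars.upper, hw, List.map_append, hx, List.map_append]
  rw [tokens_allneg_prefix (by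
    intro c hc
    rcases List.mem_map.1 hc with ⟨x, hx1, rfl⟩
    exact space_upper_not_good (List.mem_takeWhile_imp hx1))]
  rw [tokens_allneg_suffix (by
    intro c hc
    rcases List.mem_map.1 hc with ⟨x, hx1, rfl⟩
    exact space_upper_not_good (List.mem_takeWhile_imp (List.mem_reverse.1 hx1)))]
  rw [PySem.Chars.upper, hstrip]

-- underscore-collapse characterisation -------------------------------------------------

theorem pvRep_cons₂_ne {a b : Char} (t : List Char) (h : ¬(a = '_' ∧ b = '_')) :
    pvRep (a :: b :: t) = a :: pvRep (b :: t) := by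
  simp only [pvRep, if_neg h]

theorem tokens_nil {p : Char → Bool} : pvTokens p [] = [] := by simp [pvTokens]

theorem tokens_cons_us (l : List Char) : pvTokens pvNe ('_' :: l) = pvTokens pvNe l := by
  rw [pvTokens, if_neg (by simp [pvNe])]

theorem pvRep_append_ne : ∀ {w d : List Char}, (∀ c ∈ w, pvNe c = true) →
    pvRep (w ++ d) = w ++ pvRep d := by
  intro w
  induction w with
  | nil => intro d _; simp
  | cons x w' ih =>
    intro d hw
    have hx : ¬ x = '_' := by
      have := hw x (List.mem_cons_self ..); simpa [pvNe] using this
    rw [List.cons_append]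
    cases hwd : w' ++ d with
    | nil =>
      rcases List.append_eq_nil_iff.1 hwd with ⟨h1, h2⟩
      subst h1; subst h2
      simp [pvRep]
    | cons y r =>
      rw [pvRep_cons₂_ne r (fun hc => hx hc.1), ← hwd,
        ih (d := d) (fun c hc => hw c (List.mem_cons_of_mem _ hc))]
      simp

theorem pvRep_us_head (dt : List Char) : ∃ r, pvRep ('_' :: dt) = '_' :: r := by
  cases dt with
  | nil => exact ⟨[], rfl⟩
  | cons e et =>
    by_cases he : e = '_'
    · subst he
      exact ⟨pvRep et, rfl⟩
    · exact ⟨pvRep (e :: et), pvRep_cons₂_ne et (fun hc => he hc.2)⟩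

theorem takeWhile_idem_ne (X : List Char) :
    List.takeWhile pvNe (List.takeWhile pvNe X) = List.takeWhile pvNe X := by
  rw [List.takeWhile_takeWhile]
  congr 1
  funext a
  by_cases ha : pvNe a <;> simp [ha]

theorem dropWhile_takeWhile_ne (X : List Char) :
    List.dropWhile pvNe (List.takeWhile pvNe X) = [] := by
  rw [List.dropWhile_eq_nil_iff]
  exact fun x hx => List.mem_takeWhile_imp hx

theorem tokens_rep (n : Nat) : ∀ xs : List Char, xs.length ≤ n →
    pvTokens pvNe (pvRep xs) = pvTokens pvNe xs := by
  induction n with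
  | zero =>
    intro xs h
    have : xs = [] := List.eq_nil_of_length_eq_zero (Nat.le_zero.1 h)
    subst this; rfl
  | succ n ih =>
    intro xs h
    match xs with
    | [] => rfl
    | [c] => rfl
    | a :: b :: t =>
      by_cases hab : a = '_' ∧ b = '_'
      · obtain ⟨rfl, rfl⟩ := hab
        rw [show pvRep ('_' :: '_' :: t) = '_' :: pvRep t from rfl,
          tokens_cons_us, tokens_cons_us, tokens_cons_us]
        exact ih t (by simp at h ⊢; omega)
      · rw [pvRep_cons₂_ne t hab]
        by_cases ha : a = '_'
        · subst ha
          rw [tokens_cons_us, tokens_cons_us]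
          exact ih (b :: t) (by simp at h ⊢; omega)
        · have hne : pvNe a = true := by simp [pvNe, ha]
          have hrep : pvRep (b :: t)
              = List.takeWhile pvNe (b :: t) ++ pvRep (List.dropWhile pvNe (b :: t)) := by
            conv_lhs => rw [← List.takeWhile_append_dropWhile (p := pvNe) (l := b :: t)]
            exact pvRep_append_ne (fun c hc => List.mem_takeWhile_imp hc)
          rw [pvTokens, if_pos hne, pvTokens, if_pos hne, hrep]
          cases hd : List.dropWhile pvNe (b :: t) with
          | nil =>
            rw [show pvRep ([] : List Char) = [] from rfl, List.append_nil,
              takeWhile_idem_ne, dropWhile_takeWhile_ne]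
          | cons d dt =>
            have hd' : d = '_' := by
              have := dropWhile_head_neg hd; simpa [pvNe] using this
            subst hd'
            obtain ⟨r, hr⟩ := pvRep_us_head dt
            rw [hr]
            have hturs : List.takeWhile pvNe ('_' :: r) = [] :=
              List.takeWhile_cons_of_neg (by simp [pvNe])
            have htake : List.takeWhile pvNe (List.takeWhile pvNe (b :: t) ++ '_' :: r)
                = List.takeWhile pvNe (b :: t) := by
              rw [List.takeWhile_append]
              rw [if_pos (by rw [takeWhile_idem_ne])]
              rw [hturs, List.append_nil]
            have hdurs : List.dropWhile pvNe ('_' :: r) = '_' :: r :=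
              List.dropWhile_cons_of_neg (by simp [pvNe])
            have hdrop : List.dropWhile pvNe (List.takeWhile pvNe (b :: t) ++ '_' :: r)
                = '_' :: r := by
              rw [List.dropWhile_append]
              rw [if_pos (by simp [dropWhile_takeWhile_ne])]
              exact hdurs
            rw [htake, hdrop, ← hr]
            have hlen : ('_' :: dt).length ≤ n := by
              have h1 : (List.dropWhile pvNe (b :: t)).length ≤ (b :: t).length :=
                List.length_dropWhile_le _ _
              rw [hd] at h1
              simp at h1 h ⊢
              omega
            rw [ih ('_' :: dt) hlen, tokens_cons_us]

-- the underscore-membership predicate used by key.strip("_")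
def pvNu (c : Char) : Bool := !pvNe c

theorem stripChars_us (s : List Char) :
    PySem.Chars.stripChars s ['_']
      = (List.dropWhile pvNu (List.dropWhile pvNu s).reverse).reverse := by
  unfold PySem.Chars.stripChars
  have hfun : (fun c => (['_'] : List Char).contains c) = pvNu := by
    funext c
    by_cases hc : c = '_' <;> simp [pvNu, pvNe, List.contains_eq_mem, hc]
  rw [hfun]

theorem dropWhile_nu_of_all_ne {X : List Char} (hX : ∀ c ∈ X, pvNe c = true) :
    List.dropWhile pvNu X = X :=
  dropWhile_eq_self_of_head (takeWhile_nil_of_allneg (fun c hc => by simp [pvNu, hX c hc]))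

theorem strip_nodouble (n : Nat) : ∀ xs : List Char, xs.length ≤ n →
    ¬ (['_', '_'] <:+: xs) →
    PySem.Chars.stripChars xs ['_'] = PySem.Chars.join ['_'] (pvTokens pvNe xs) := by
  induction n with
  | zero =>
    intro xs h _
    have : xs = [] := List.eq_nil_of_length_eq_zero (Nat.le_zero.1 h)
    subst this
    rw [tokens_nil, PySem.Chars.join_nil]; rfl
  | succ n ih =>
    intro xs h hdd
    cases xs with
    | nil => rw [tokens_nil, PySem.Chars.join_nil]; rfl
    | cons a t =>
      by_cases ha : a = '_'
      · subst ha
        rw [stripChars_us]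
        have hthead : List.dropWhile pvNu t = t := by
          cases t with
          | nil => rfl
          | cons e t' =>
            have he : ¬ e = '_' := by
              intro he; subst he
              exact hdd ⟨[], t', rfl⟩
            exact List.dropWhile_cons_of_neg (by simp [pvNu, pvNe, he])
        rw [List.dropWhile_cons_of_pos (by simp [pvNu, pvNe]), hthead]
        have hinf : ¬ (['_', '_'] <:+: t) := fun hf =>
          hdd (hf.trans (List.suffix_cons '_' t).isInfix)
        have hih := ih t (by simp at h ⊢; omega) hinf
        rw [stripChars_us, hthead] at hih
        rw [hih, tokens_cons_us]
      · have hne : pvNe a = true := by simp [pvNe, ha]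
        rw [stripChars_us]
        have hxs : a :: t = (a :: List.takeWhile pvNe t) ++ List.dropWhile pvNe t := by
          rw [List.cons_append, List.takeWhile_append_dropWhile]
        have hall : ∀ c ∈ a :: List.takeWhile pvNe t, pvNe c = true := by
          intro c hc
          rcases List.mem_cons.1 hc with rfl | hc'
          · exact hne
          · exact List.mem_takeWhile_imp hc'
        rw [pvTokens, if_pos hne]
        cases hd : List.dropWhile pvNe t with
        | nil =>
          have hteq : List.takeWhile pvNe t = t := by
            have := List.takeWhile_append_dropWhile (p := pvNe) (l := t)
            rw [hd, List.append_nil] at this; exact this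
          have halln : ∀ c ∈ a :: t, pvNe c = true := by rw [← hteq]; exact hall
          have h1 : List.dropWhile pvNu (a :: t) = a :: t := dropWhile_nu_of_all_ne halln
          have h2 : List.dropWhile pvNu (a :: t).reverse = (a :: t).reverse :=
            dropWhile_nu_of_all_ne (fun c hc => halln c (List.mem_reverse.1 hc))
          rw [h1, h2, List.reverse_reverse, tokens_nil, PySem.Chars.join_singleton, hteq]
        | cons d dt =>
          have hd' : d = '_' := by
            have := dropWhile_head_neg hd; simpa [pvNe] using this
          subst hd'
          cases dt with
          | nil =>
            -- xs = (a :: tw) ++ ['_']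
            have hxs2 : a :: t = (a :: List.takeWhile pvNe t) ++ ['_'] := by
              rw [hxs, hd]
            have h1 : List.dropWhile pvNu (a :: t) = a :: t := by
              exact List.dropWhile_cons_of_neg (by simp [pvNu, pvNe, ha])
            have h2 : (a :: t).reverse = '_' :: (a :: List.takeWhile pvNe t).reverse := by
              rw [hxs2, List.reverse_append]; rfl
            rw [h1, h2, List.dropWhile_cons_of_pos (by simp [pvNu, pvNe]),
              dropWhile_nu_of_all_ne (fun c hc => hall c (List.mem_reverse.1 hc)),
              List.reverse_reverse]
            rw [tokens_cons_us, tokens_nil, PySem.Chars.join_singleton]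
          | cons e dt' =>
            have he : pvNe e = true := by
              have : ¬ e = '_' := by
                intro he; subst he
                -- '__' is an infix of xs via dropWhile suffix
                have hsuf : ('_' :: '_' :: dt') <:+ t := hd ▸ List.dropWhile_suffix pvNe
                exact hdd (List.IsInfix.trans ⟨[], dt', by simp⟩
                  (hsuf.isInfix.trans (List.suffix_cons a t).isInfix))
              simp [pvNe, this]
            -- IH on e :: dt'
            have hsuf : ('_' :: e :: dt') <:+ t := hd ▸ List.dropWhile_suffix pvNe
            have hlen : (e :: dt').length ≤ n := by
              have := hsuf.length_le
              simp at this h ⊢; omega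
            have hinf : ¬ (['_', '_'] <:+: (e :: dt')) := fun hf =>
              hdd ((hf.trans ⟨['_'], [], by simp⟩).trans
                (hsuf.isInfix.trans (List.suffix_cons a t).isInfix))
            have hih := ih (e :: dt') hlen hinf
            rw [stripChars_us] at hih
            have hedrop : List.dropWhile pvNu (e :: dt') = e :: dt' :=
              List.dropWhile_cons_of_neg (by simp [pvNu, he])
            rw [hedrop] at hih
            -- left side computation
            have h1 : List.dropWhile pvNu (a :: t) = a :: t :=
              List.dropWhile_cons_of_neg (by simp [pvNu, pvNe, ha])
            have hxs3 : a :: t = (a :: List.takeWhile pvNe t) ++ '_' :: e :: dt' := by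
              rw [hxs, hd]
            have h2 : (a :: t).reverse
                = (e :: dt').reverse ++ '_' :: (a :: List.takeWhile pvNe t).reverse := by
              rw [hxs3, List.reverse_append, List.reverse_cons]
              simp
            have hnonempty : ¬ (List.dropWhile pvNu (e :: dt').reverse).isEmpty = true := by
              rw [List.isEmpty_iff, List.dropWhile_eq_nil_iff]
              intro hforall
              have := hforall e (by simp)
              simp [pvNu, he] at this
            rw [h1, h2, List.dropWhile_append, if_neg hnonempty, List.reverse_append,
              List.reverse_cons, List.reverse_reverse]
            -- right side
            rw [tokens_cons_us]
            have htokcons : ∃ x xs0, pvTokens pvNe (e :: dt') = x :: xs0 :=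
              ⟨_, _, by rw [pvTokens, if_pos he]⟩
            obtain ⟨x, xs0, hx⟩ := htokcons
            rw [hx, PySem.Chars.join_cons_cons, ← hx, ← hih]

theorem strip_collapse (n : Nat) : ∀ xs : List Char, xs.length ≤ n →
    PySem.Chars.stripChars (pvCollapse xs) ['_'] = PySem.Chars.join ['_'] (pvTokens pvNe xs) := by
  induction n with
  | zero =>
    intro xs h
    have : xs = [] := List.eq_nil_of_length_eq_zero (Nat.le_zero.1 h)
    subst this
    rw [pvCollapse, dif_neg (by decide), tokens_nil, PySem.Chars.join_nil]; rfl
  | succ n ih =>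
    intro xs h
    rw [pvCollapse]
    by_cases hin : PySem.Chars.isIn "__".toList xs = true
    · rw [dif_pos hin]
      have hinf : ['_', '_'] <:+: xs := by
        have := (PySem.Chars.isIn_iff_infix "__".toList xs).1 hin
        rwa [show ("__".toList : List Char) = ['_', '_'] from rfl] at this
      rw [show ("__".toList : List Char) = ['_', '_'] from rfl,
        show ("_".toList : List Char) = ['_'] from rfl, replace_uu]
      have hlen : (pvRep xs).length ≤ n := by
        have := pvRep_length_lt xs hinf; omega
      rw [ih (pvRep xs) hlen, tokens_rep xs.length xs (le_refl _)]
    · rw [dif_neg hin]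
      have hninf : ¬ (['_', '_'] <:+: xs) := by
        have := (PySem.Chars.isIn_eq_false_iff "__".toList xs).1 (by simpa using hin)
        rwa [show ("__".toList : List Char) = ['_', '_'] from rfl] at this
      exact strip_nodouble xs.length xs (le_refl _) hninf

-- main key equality --------------------------------------------------------------------

theorem key_eq (word : String) :
    PySem.Chars.stripChars
      (pvCollapse ((PySem.Str.replace (PySem.Str.replace (normalize_word_py word) " " "_") "-" "_").toList.map
        (fun ch => if pvAllowed.contains ch then ch else '_'))) ['_']
    = PySem.Chars.join ['_'] (pvTokens pvGood (PySem.Chars.upper word.toList)) := by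
  -- bring the whole A-side key to the Chars level
  have hnorm : (normalize_word_py word).toList
      = PySem.Chars.join [' ']
          (PySem.Chars.split₀ (PySem.Chars.upper (PySem.Chars.strip word.toList))) := by
    unfold normalize_word_py
    rw [PySem.Str.toList_join, PySem.Str.split₀_map_toList, PySem.Str.toList_upper,
      PySem.Str.toList_strip, show (" " : String).toList = [' '] from rfl]
  have hraw : (PySem.Str.replace (PySem.Str.replace (normalize_word_py word) " " "_") "-" "_").toList
      = ((normalize_word_py word).toList.map (fun c => if c = ' ' then '_' else c)).map
          (fun c => if c = '-' then '_' else c) := by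
    rw [PySem.Str.toList_replace, PySem.Str.toList_replace,
      show (" " : String).toList = [' '] from rfl,
      show ("-" : String).toList = ['-'] from rfl,
      show ("_" : String).toList = ['_'] from rfl,
      replace_single, replace_single]
  rw [hraw, List.map_map, List.map_map]
  simp only [Function.comp_def]
  rw [List.map_congr_left (fun c _ => filter_comp c)]
  rw [strip_collapse ((normalize_word_py word).toList.map
      (fun c => if pvGood c then c else '_')).length _ (le_refl _)]
  refine congrArg (PySem.Chars.join ['_']) ?_
  rw [tokens_map (p1 := pvGood) (p2 := pvNe)
      (fun x => by
        by_cases hg : pvGood x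
        · rw [if_pos hg, good_not_us hg, hg]
        · rw [if_neg hg]
          simp [pvNe]
          simpa using hg)
      (fun x hx => by rw [if_pos hx])
      (normalize_word_py word).toList.length _ (le_refl _)]
  rw [hnorm]
  rw [tokens_join (by decide) (PySem.Chars.split₀
      (PySem.Chars.upper (PySem.Chars.strip word.toList)))]
  rw [split₀_eq_tokens]
  rw [← tokens_refine (q := fun c => !PySem.Chars.isspace c)
      (fun c hc => by simp [good_not_space hc])
      (PySem.Chars.upper (PySem.Chars.strip word.toList)).length _ (le_refl _)]
  exact tokens_upper_strip word.toList

-- ===== VERDICT (by name: the statement is the Claim_ definition above) =====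
theorem word_to_class_key_py_spec : Claim_equal_word_to_class_key_py := by
  intro word _ _
  unfold Spec_word_to_class_key_py word_to_class_key_py word_to_class_key_py_alt
  simp only [key_eq word]
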